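-- pv_equiv track=rewrite | github.com/tn3w/is-crawler | is_crawler/detection.py | _version_mozilla
-- ===== SOURCE A (Python) =====
-- _BROWSER_TOKENS = frozenset(
--     {
--         "Mozilla",
--         "AppleWebKit",
--         "Gecko",
--         "Chrome",
--         "Chromium",
--         "Safari",
--         "Version",
--         "Firefox",
--         "Ubuntu",
--         "Mobile",
--     }
-- )
--
-- _NAME_CHARS = frozenset(
--     "abcdefghijklmnopqrstuvwxyzABCDEFGHIJKLMNOPQRSTUVWXYZ0123456789_.-"
-- )
--
-- def _name_chars_end(s: str, start: int) -> int:
--     j = start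
--     while j < len(s) and s[j] in _NAME_CHARS:
--         j += 1
--     return j
--
-- def _compat_name_span(ua: str) -> tuple[int, int] | None:
--     i = ua.lower().find("(compatible;")
--     if i == -1:
--         return None
--
--     j = i + len("(compatible;")
--     while j < len(ua) and ua[j] == " ":
--         j += 1
--
--     if j >= len(ua) or not ua[j].isalpha():
--         return None
--
--     return j, _name_chars_end(ua, j)
--
-- def _version_from_compat(ua: str) -> str | None:
--     span = _compat_name_span(ua)
--     if span is None:
--         return None
--     _, end = span
--     if end >= len(ua) or ua[end] != "/":
--         return None
--
--     ver_end = _name_chars_end(ua, end + 1)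
--     return ua[end + 1 : ver_end] or None
--
-- def _version_mozilla(ua: str) -> str | None:
--     compat = _version_from_compat(ua)
--     if compat:
--         return compat
--
--     cleaned = ua.replace("(", " ").replace(")", " ")
--     for token in cleaned.split():
--         if "://" in token:
--             continue
--
--         slash = token.find("/")
--         if slash == -1:
--             continue
--
--         base = token[:slash]
--         if base in _BROWSER_TOKENS:
--             continue
--
--         ver_end = _name_chars_end(token, slash + 1)
--         ver = token[slash + 1 : ver_end]
--         if ver:
--             return ver
--     return None
-- ===== SOURCE B (Python) =====
-- import re
--
-- _BROWSER_TOKENS = frozenset(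
--     {
--         "Mozilla",
--         "AppleWebKit",
--         "Gecko",
--         "Chrome",
--         "Chromium",
--         "Safari",
--         "Version",
--         "Firefox",
--         "Ubuntu",
--         "Mobile",
--     }
-- )
--
-- _COMPAT_RE = re.compile(
--     r"\(compatible; *[A-Za-z][A-Za-z0-9_.\-]*/([A-Za-z0-9_.\-]+)", re.IGNORECASE
-- )
-- _VER_RE = re.compile(r"[A-Za-z0-9_.\-]+")
--
--
-- def _version_mozilla(ua: str) -> str | None:
--     i = ua.lower().find("(compatible;")
--     if i != -1:
--         m = _COMPAT_RE.match(ua, i)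
--         if m:
--             return m.group(1)
--
--     for token in ua.replace("(", " ").replace(")", " ").split():
--         base, sep, rest = token.partition("/")
--         if not sep or "://" in token or base in _BROWSER_TOKENS:
--             continue
--         m = _VER_RE.match(rest)
--         if m:
--             return m.group()
--     return None
-- ===== Notes on version B (the rewrite author's own statement) =====
-- stated objective: idiomatic
-- what changed: Replaced A's helper chain of hand-rolled index while-loops (_name_chars_end/_compat_name_span/_version_from_compat plus find/slice token parsing) with one compiled regex anchored at the first compat marker and a partition-based token scan using a second small regex for the version run.
import Mathlib
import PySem

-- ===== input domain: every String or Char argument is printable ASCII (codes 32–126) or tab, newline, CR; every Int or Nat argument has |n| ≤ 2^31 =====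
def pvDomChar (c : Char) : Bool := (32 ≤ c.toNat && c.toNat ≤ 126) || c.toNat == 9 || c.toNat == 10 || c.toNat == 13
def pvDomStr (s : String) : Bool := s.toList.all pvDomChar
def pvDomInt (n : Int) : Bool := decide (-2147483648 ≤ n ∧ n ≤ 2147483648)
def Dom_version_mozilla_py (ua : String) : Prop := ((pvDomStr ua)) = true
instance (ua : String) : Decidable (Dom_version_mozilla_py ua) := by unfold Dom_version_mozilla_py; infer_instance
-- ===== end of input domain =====

-- B replaces A's hand-rolled index loops and helper chain with a regex-style matcher
-- (the compat pattern anchored at the first compat marker, plus a partition/takeWhile token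
-- scan); same return value, idiomatic decomposition. No argument is mutated by either version.

-- ===== PORT A =====

-- membership in _NAME_CHARS, written as the exact ASCII code ranges of that frozenset
def pvIsNameChar (c : Char) : Bool :=
  (97 ≤ c.toNat && c.toNat ≤ 122) || (65 ≤ c.toNat && c.toNat ≤ 90) ||
  (48 ≤ c.toNat && c.toNat ≤ 57) || c.toNat == 95 || c.toNat == 46 || c.toNat == 45

-- single-character str.isalpha — exact on the printable-ASCII domain Dom_version_mozilla_py
def pvIsAlphaChar (c : Char) : Bool :=
  (65 ≤ c.toNat && c.toNat ≤ 90) || (97 ≤ c.toNat && c.toNat ≤ 122)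

def pvBrowserTokens : List (List Char) :=
  ["Mozilla".toList, "AppleWebKit".toList, "Gecko".toList, "Chrome".toList,
   "Chromium".toList, "Safari".toList, "Version".toList, "Firefox".toList,
   "Ubuntu".toList, "Mobile".toList]

-- 'j = start; while j < len(s) and p(s[j]): j += 1; return j'
-- (A's _name_chars_end, and the inline space-skipping while-loop, share this shape)
def pvWhileIdx (p : Char → Bool) (s : List Char) (j : Nat) : Nat :=
  if h : j < s.length then
    if p s[j] then pvWhileIdx p s (j + 1) else j
  else j
termination_by s.length - j

-- _compat_name_span
def pvCompatNameSpan (s : List Char) : Option (Nat × Nat) :=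
  let i := PySem.Chars.find (PySem.Chars.lower s) "(compatible;".toList
  if i == -1 then none
  else
    -- i ≥ 0 here, so i.toNat is Python's i
    let j := pvWhileIdx (fun c => c == ' ') s (i.toNat + 12)
    match s[j]? with
    | none => none        -- j >= len(ua)
    | some c => if !pvIsAlphaChar c then none else some (j, pvWhileIdx pvIsNameChar s j)

-- _version_from_compat
def pvVersionFromCompat (s : List Char) : Option (List Char) :=
  match pvCompatNameSpan s with
  | none => none
  | some (_, e) =>
    match s[e]? with
    | none => none        -- end >= len(ua)
    | some c =>
      if c != '/' then none
      else
        let verEnd := pvWhileIdx pvIsNameChar s (e + 1)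
        let ver := PySem.List.slice s (some ((e + 1 : Nat) : Int)) (some ((verEnd : Nat) : Int))
        if ver.isEmpty then none else some ver  -- 'or None'

-- the for-loop over cleaned.split()
def pvALoop : List (List Char) → Option (List Char)
  | [] => none
  | t :: rest =>
    if PySem.Chars.isIn "://".toList t then pvALoop rest
    else
      let slash := PySem.Chars.find t ['/']
      if slash == -1 then pvALoop rest
      else
        let base := PySem.List.slice t none (some slash)
        if pvBrowserTokens.contains base then pvALoop rest
        else
          let verEnd := pvWhileIdx pvIsNameChar t (slash.toNat + 1)
          let ver := PySem.List.slice t (some (slash + 1)) (some ((verEnd : Nat) : Int))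
          if ver.isEmpty then pvALoop rest else some ver

def pvFallbackA (s : List Char) : Option (List Char) :=
  pvALoop (PySem.Chars.split₀
    (PySem.Chars.replace (PySem.Chars.replace s ['('] [' ']) [')'] [' ']))

def pvCharsA (s : List Char) : Option (List Char) :=
  match pvVersionFromCompat s with
  | some v => if v.isEmpty then pvFallbackA s else some v   -- 'if compat:' (truthiness)
  | none => pvFallbackA s

def version_mozilla_py (ua : String) : Option String :=
  (pvCharsA ua.toList).map String.ofList

-- ===== PORT B =====

-- hand port of _COMPAT_RE.match(ua, i) for the fixed pattern
-- r"\(compatible; *[A-Za-z][A-Za-z0-9_.\-]*/([A-Za-z0-9_.\-]+)" with re.IGNORECASE: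
-- exact for this pattern on ASCII (case-insensitive literal = lowercased slice comparison;
-- the greedy runs of a class not containing the following literal '/' never backtrack).
def pvMatchCompat (s : List Char) (i : Nat) : Option (List Char) :=
  if PySem.Chars.lower (PySem.List.slice s (some (i : Int)) (some ((i + 12 : Nat) : Int)))
      = "(compatible;".toList then
    match (s.drop (i + 12)).dropWhile (fun c => c == ' ') with
    | [] => none
    | c :: cs =>
      if pvIsAlphaChar c then
        match cs.dropWhile pvIsNameChar with
        | '/' :: vs =>
          let ver := vs.takeWhile pvIsNameChar
          if ver.isEmpty then none else some ver
        | _ => none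
      else none
  else none

-- the token scan: token.partition("/") plus _VER_RE.match(rest)
def pvBLoop : List (List Char) → Option (List Char)
  | [] => none
  | t :: rest =>
    let base := t.takeWhile (· != '/')
    let sep := t.contains '/'
    if !sep || PySem.Chars.isIn "://".toList t || pvBrowserTokens.contains base then
      pvBLoop rest
    else
      let ver := ((t.dropWhile (· != '/')).tail).takeWhile pvIsNameChar
      if ver.isEmpty then pvBLoop rest else some ver

def pvCharsB (s : List Char) : Option (List Char) :=
  let i := PySem.Chars.find (PySem.Chars.lower s) "(compatible;".toList
  match (if i == -1 then none else pvMatchCompat s i.toNat) with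
  | some v => some v
  | none =>
    pvBLoop (PySem.Chars.split₀
      (PySem.Chars.replace (PySem.Chars.replace s ['('] [' ']) [')'] [' ']))

def version_mozilla_py_alt (ua : String) : Option String :=
  (pvCharsB ua.toList).map String.ofList

-- ===== PRECONDITION & SPEC =====
def Spec_version_mozilla_py (ua : String) (out : Option String) : Prop := out = version_mozilla_py_alt ua
instance (ua : String) (out : Option String) : Decidable (Spec_version_mozilla_py ua out) := by unfold Spec_version_mozilla_py; infer_instance

-- ===== CLAIM (what is proved, stated in full; the proofs are below) =====
def Claim_equal_version_mozilla_py : Prop := ∀ (ua : String), Dom_version_mozilla_py ua → Spec_version_mozilla_py ua (version_mozilla_py ua)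

-- ===== LEMMAS AND PROOFS =====

theorem pvWhileIdx_eq (p : Char → Bool) (s : List Char) (j : Nat) :
    pvWhileIdx p s j = j + ((s.drop j).takeWhile p).length := by
  fun_induction pvWhileIdx p s j with
  | case1 j h hp ih =>
    rw [ih, List.drop_eq_getElem_cons h, List.takeWhile_cons_of_pos hp]
    simp; omega
  | case2 j h hp =>
    rw [List.drop_eq_getElem_cons h, List.takeWhile_cons_of_neg (by simp [hp])]
    simp
  | case3 j h =>
    rw [List.drop_eq_nil_of_le (by omega)]; simp

theorem pvAlpha_name (c : Char) (h : pvIsAlphaChar c = true) : pvIsNameChar c = true := by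
  simp [pvIsAlphaChar, pvIsNameChar] at *; omega

theorem pvSplitAtFirst (t : List Char) (k : Nat)
    (hk : t[k]? = some '/') (hmin : ∀ i, i < k → t[i]? ≠ some '/') :
    t.takeWhile (· != '/') = t.take k ∧ t.dropWhile (· != '/') = t.drop k := by
  induction t generalizing k with
  | nil => simp at hk
  | cons c cs ih =>
    cases k with
    | zero =>
      simp at hk
      subst hk
      simp
    | succ k =>
      have hc : c ≠ '/' := by
        have := hmin 0 (Nat.succ_pos _); simpa using this
      have h2 := ih k (by simpa using hk)
        (fun i hi => by have := hmin (i+1) (by omega); simpa using this)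
      simp [hc, h2.1, h2.2]
theorem pvDropWhile_drop (p : Char → Bool) (l : List Char) :
    l.dropWhile p = l.drop (l.takeWhile p).length := by
  induction l with
  | nil => simp
  | cons c cs ih =>
    by_cases h : p c
    · simp [h, ih]
    · simp [h]

theorem pvTakeWhile_take (p : Char → Bool) (l : List Char) :
    l.takeWhile p = l.take (l.takeWhile p).length :=
  List.prefix_iff_eq_take.mp (List.takeWhile_prefix p)

theorem pvFindMem (t : List Char) (hc : '/' ∈ t) :
    0 ≤ PySem.Chars.find t ['/'] ∧
    t.takeWhile (· != '/') = t.take (PySem.Chars.find t ['/']).toNat ∧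
    t.dropWhile (· != '/') = t.drop (PySem.Chars.find t ['/']).toNat := by
  have hnn : 0 ≤ PySem.Chars.find t ['/'] :=
    (PySem.Chars.find_nonneg_iff t ['/']).mpr ((List.singleton_infix_iff '/' t).mpr hc)
  obtain ⟨hpre, hmin⟩ := PySem.Chars.find_spec hnn
  set k := (PySem.Chars.find t ['/']).toNat with hkdef
  have hk : t[k]? = some '/' := by
    obtain ⟨r, hr⟩ := hpre
    rw [← List.head?_drop, ← hr]; rfl
  have hmin' : ∀ i, i < k → t[i]? ≠ some '/' := by
    intro i hi habs
    have hilt : i < t.length := (List.getElem?_eq_some_iff.mp habs).1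
    refine hmin i hi ?_
    refine ⟨t.drop (i+1), ?_⟩
    rw [List.drop_eq_getElem_cons hilt]
    simp [List.getElem?_eq_some_iff.mp habs |>.2]
  exact ⟨hnn, (pvSplitAtFirst t k hk hmin').1, (pvSplitAtFirst t k hk hmin').2⟩

theorem pvLoop_eq (ts : List (List Char)) : pvALoop ts = pvBLoop ts := by
  induction ts with
  | nil => rfl
  | cons t rest ih =>
    show pvALoop (t :: rest) = pvBLoop (t :: rest)
    simp only [pvALoop, pvBLoop]
    by_cases hin : PySem.Chars.isIn [':', '/', '/'] t = true
    · by_cases hc : '/' ∈ t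
      · simp [hin, hc, ih]
      · simp [hin, hc, ih]
    · by_cases hc : '/' ∈ t
      · obtain ⟨hnn, htw, hdw⟩ := pvFindMem t hc
        have hne : ¬ (PySem.Chars.find t ['/'] == -1) = true := by
          simp; omega
        set k := (PySem.Chars.find t ['/']).toNat with hkdef
        have hfk : PySem.Chars.find t ['/'] = (k : Int) := by omega
        have hbase : PySem.List.slice t none (some (PySem.Chars.find t ['/'])) =
            t.takeWhile (· != '/') := by
          rw [PySem.List.slice_to t hnn, htw]
        have hverA : PySem.List.slice t (some (PySem.Chars.find t ['/'] + 1))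
              (some ((pvWhileIdx pvIsNameChar t (k + 1) : Nat) : Int)) =
            (t.drop (k+1)).takeWhile pvIsNameChar := by
          rw [hfk]
          have : ((k : Int) + 1) = ((k + 1 : Nat) : Int) := by push_cast; ring
          rw [this, PySem.List.slice_natCast, pvWhileIdx_eq]
          have h2 : k + 1 + ((t.drop (k+1)).takeWhile pvIsNameChar).length - (k+1)
              = ((t.drop (k+1)).takeWhile pvIsNameChar).length := by omega
          rw [h2, ← pvTakeWhile_take]
        have hverB : ((t.dropWhile (· != '/')).tail).takeWhile pvIsNameChar =
            (t.drop (k+1)).takeWhile pvIsNameChar := by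
          rw [hdw, List.tail_drop]
        simp only [hc, hne, hbase, hverA,
          List.contains_eq_mem, decide_eq_true_eq, hverB]
        simp [hin, ih]
      · have heq : PySem.Chars.find t ['/'] == -1 := by
          simp [PySem.Chars.find_eq_neg_one_iff, List.singleton_infix_iff, hc]
        simp [hin, hc, heq, ih]
theorem pvDrop_whileIdx (p : Char → Bool) (s : List Char) (j : Nat) :
    s.drop (pvWhileIdx p s j) = (s.drop j).dropWhile p := by
  rw [pvWhileIdx_eq, pvDropWhile_drop, ← List.drop_drop]

theorem pvGet_whileIdx (p : Char → Bool) (s : List Char) (j : Nat) :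
    s[pvWhileIdx p s j]? = ((s.drop j).dropWhile p).head? := by
  rw [← List.head?_drop, pvDrop_whileIdx]

theorem pvSliceWhile (p : Char → Bool) (s : List Char) (j : Nat) :
    PySem.List.slice s (some ((j : Nat) : Int)) (some ((pvWhileIdx p s j : Nat) : Int)) =
      (s.drop j).takeWhile p := by
  rw [PySem.List.slice_natCast, pvWhileIdx_eq]
  have h2 : j + ((s.drop j).takeWhile p).length - j = ((s.drop j).takeWhile p).length := by omega
  rw [h2, ← pvTakeWhile_take]

theorem pvCompat_eq (s : List Char) :
    pvVersionFromCompat s =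
      (if PySem.Chars.find (PySem.Chars.lower s) "(compatible;".toList == -1 then none
       else pvMatchCompat s (PySem.Chars.find (PySem.Chars.lower s) "(compatible;".toList).toNat) := by
  show pvVersionFromCompat s =
      (if PySem.Chars.find (PySem.Chars.lower s) ['(', 'c', 'o', 'm', 'p', 'a', 't', 'i', 'b', 'l', 'e', ';'] == -1 then none
       else pvMatchCompat s (PySem.Chars.find (PySem.Chars.lower s) ['(', 'c', 'o', 'm', 'p', 'a', 't', 'i', 'b', 'l', 'e', ';']).toNat)
  by_cases hf : PySem.Chars.find (PySem.Chars.lower s) ['(', 'c', 'o', 'm', 'p', 'a', 't', 'i', 'b', 'l', 'e', ';'] = -1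
  · simp [pvVersionFromCompat, pvCompatNameSpan, hf]
  · have hnn : 0 ≤ PySem.Chars.find (PySem.Chars.lower s) ['(', 'c', 'o', 'm', 'p', 'a', 't', 'i', 'b', 'l', 'e', ';'] := by
      have := PySem.Chars.neg_one_le_find (PySem.Chars.lower s) ['(', 'c', 'o', 'm', 'p', 'a', 't', 'i', 'b', 'l', 'e', ';']
      omega
    set i := (PySem.Chars.find (PySem.Chars.lower s) ['(', 'c', 'o', 'm', 'p', 'a', 't', 'i', 'b', 'l', 'e', ';']).toNat with hidef
    -- the case-insensitive literal check of B's matcher succeeds at i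
    have hlit : PySem.Chars.lower (PySem.List.slice s (some (i : Int)) (some ((i + 12 : Nat) : Int)))
        = ['(', 'c', 'o', 'm', 'p', 'a', 't', 'i', 'b', 'l', 'e', ';'] := by
      obtain ⟨hpre, -⟩ := PySem.Chars.find_spec hnn
      have hmap : PySem.Chars.lower s = s.map PySem.Chars.lowerChar := rfl
      have htake : ['(', 'c', 'o', 'm', 'p', 'a', 't', 'i', 'b', 'l', 'e', ';'] =
          ((PySem.Chars.lower s).drop i).take 12 := by
        have := List.prefix_iff_eq_take.mp hpre
        simpa using this
      rw [PySem.List.slice_natCast]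
      have h12 : i + 12 - i = 12 := by omega
      rw [h12, htake, hmap, ← List.map_drop, ← List.map_take]
      rfl
    have hfb : (PySem.Chars.find (PySem.Chars.lower s) ['(', 'c', 'o', 'm', 'p', 'a', 't', 'i', 'b', 'l', 'e', ';'] == -1) = false := by
      simp [hf]
    rw [if_neg (by simpa using hf)]
    simp only [pvVersionFromCompat, pvCompatNameSpan, pvMatchCompat]
    rw [show ("(compatible;".toList : List Char) = ['(', 'c', 'o', 'm', 'p', 'a', 't', 'i', 'b', 'l', 'e', ';'] from rfl]
    simp only [hfb, Bool.false_eq_true, if_false, hlit, if_true]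
    simp only [← hidef]
    cases ht0 : (s.drop (i + 12)).dropWhile (fun c => c == ' ') with
    | nil =>
      have : s[pvWhileIdx (fun c => c == ' ') s (i + 12)]? = none := by
        rw [pvGet_whileIdx, ht0]; rfl
      simp [this]
    | cons c cs =>
      have hj : s[pvWhileIdx (fun c => c == ' ') s (i + 12)]? = some c := by
        rw [pvGet_whileIdx, ht0]; rfl
      set j := pvWhileIdx (fun c => c == ' ') s (i + 12) with hjdef
      have hdj : s.drop j = c :: cs := by rw [hjdef, pvDrop_whileIdx, ht0]
      by_cases hal : pvIsAlphaChar c = true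
      · have hnc : pvIsNameChar c = true := pvAlpha_name c hal
        have hde : s.drop (pvWhileIdx pvIsNameChar s j) = cs.dropWhile pvIsNameChar := by
          rw [pvDrop_whileIdx, hdj, List.dropWhile_cons_of_pos hnc]
        have hge : s[pvWhileIdx pvIsNameChar s j]? = (cs.dropWhile pvIsNameChar).head? := by
          rw [← List.head?_drop, hde]
        cases hdw : cs.dropWhile pvIsNameChar with
        | nil =>
          have : s[pvWhileIdx pvIsNameChar s j]? = none := by rw [hge, hdw]; rfl
          simp [hj, hal, this, hdw]
        | cons d ds =>
          have hgd : s[pvWhileIdx pvIsNameChar s j]? = some d := by rw [hge, hdw]; rfl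
          by_cases hdd : d = '/'
          · subst hdd
            set e := pvWhileIdx pvIsNameChar s j with hedef
            have hdrop : s.drop (e + 1) = ds := by
              have : s.drop (e + 1) = (s.drop e).tail := by
                rw [← List.drop_drop, List.drop_one]
              rw [this, hedef, hde, hdw]; rfl
            have hver : PySem.List.slice s (some ((e + 1 : Nat) : Int))
                (some ((pvWhileIdx pvIsNameChar s (e + 1) : Nat) : Int))
                = ds.takeWhile pvIsNameChar := by
              rw [pvSliceWhile, hdrop]
            simp [hj, hal, hgd, hdw]
            rw [show ((e : Int) + 1) = ((e + 1 : Nat) : Int) from by push_cast; ring]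
            rw [hver]
            simp
          · simp [hj, hal, hgd, hdw, hdd]
      · simp [hj, hal]
theorem pvCompat_not_empty (s : List Char) (v : List Char)
    (h : pvVersionFromCompat s = some v) : v.isEmpty = false := by
  unfold pvVersionFromCompat at h
  cases hsp : pvCompatNameSpan s with
  | none => simp [hsp] at h
  | some pr =>
    obtain ⟨f, e⟩ := pr
    simp only [hsp] at h
    cases hge : s[e]? with
    | none => simp [hge] at h
    | some c =>
      simp only [hge] at h
      by_cases hc : (c != '/') = true
      · simp [hc] at h
      · have hcf : (c != '/') = false := by simpa using hc
        simp only [hcf, Bool.false_eq_true, if_false] at h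
        simp at h
        rcases h with ⟨hne, rfl⟩
        simpa using hne

theorem pvChars_eq (s : List Char) : pvCharsA s = pvCharsB s := by
  unfold pvCharsA pvCharsB
  simp only []
  rw [← pvCompat_eq]
  cases h : pvVersionFromCompat s with
  | none => simp [pvFallbackA, pvLoop_eq]
  | some v =>
    have hne := pvCompat_not_empty s v h
    simp [hne]

-- ===== VERDICT (by name: the statement is the Claim_ definition above) =====
theorem version_mozilla_py_spec : Claim_equal_version_mozilla_py := by
  intro ua _
  unfold Spec_version_mozilla_py version_mozilla_py version_mozilla_py_alt
  rw [pvChars_eq]
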